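-- pv_equiv track=rewrite | github.com/seroak/python-algorithm | 프로그래머스 단어 퍼즐/main.py | solution
-- ===== SOURCE A (Python) =====
-- def solution(strs, t):
--     n = len(t)
--     INF = float("inf")
--     dp = [INF] * n + [0]
--     for i in range(n - 1, -1, -1):
--         for j in range(1, min(6, n - i + 1)):
--             if t[i:i+j] in strs:
--                dp[i] = min(dp[i], dp[i+j] + 1)
--     return -1 if dp[0] == INF else dp[0]
-- ===== SOURCE B (Python) =====
-- def solution(strs, t):
--     # Forward "push" DP: relax reachable prefix lengths by iterating over the
--     # word list and prefix-matching, instead of A's backward suffix DP that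
--     # slices every window length and scans strs for membership.
--     n = len(t)
--     best = [None] * (n + 1)
--     best[0] = 0
--     for i in range(n):
--         b = best[i]
--         if b is None:
--             continue
--         for w in strs:
--             L = len(w)
--             if 1 <= L <= 5 and t[i:i+L] == w:
--                 k = i + L
--                 c = b + 1
--                 if best[k] is None or c < best[k]:
--                     best[k] = c
--     return -1 if best[n] is None else best[n]
-- ===== Notes on version B (the rewrite author's own statement) =====
-- stated objective: alternative
-- what changed: Replaces A's backward suffix DP (for each position, slicing every window length 1..5 and testing list membership, with a float-inf sentinel) by a forward push-relaxation DP that walks reachable prefix lengths left-to-right, iterates over the word list itself with one prefix comparison per word, and relaxes best[i+len(w)], using None as 'unreachable'.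
import Mathlib
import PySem

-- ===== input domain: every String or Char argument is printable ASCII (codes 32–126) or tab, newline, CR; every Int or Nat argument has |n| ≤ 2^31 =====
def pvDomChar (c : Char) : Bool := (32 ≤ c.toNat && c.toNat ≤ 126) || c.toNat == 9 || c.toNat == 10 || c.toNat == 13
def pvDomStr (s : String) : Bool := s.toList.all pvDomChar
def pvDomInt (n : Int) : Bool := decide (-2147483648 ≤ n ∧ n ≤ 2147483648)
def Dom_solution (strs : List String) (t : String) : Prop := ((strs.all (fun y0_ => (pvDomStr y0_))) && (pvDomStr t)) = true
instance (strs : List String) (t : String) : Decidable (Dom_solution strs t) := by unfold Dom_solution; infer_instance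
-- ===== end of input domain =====

-- B replaces A's backward suffix DP (window slices + list membership) by a forward
-- push-relaxation DP iterating over the word list with prefix matching (objective: alternative).

-- ===== PORT A =====
-- Python's float INF sentinel is modelled as `none` (dp cells hold int-or-INF); min with INF = optMin.
def optMin : Option Nat → Option Nat → Option Nat
  | none, b => b
  | some x, none => some x
  | some x, some y => some (min x y)

-- one inner-loop step of A: `if t[i:i+j] in strs: dp[i] = min(dp[i], dp[i+j] + 1)` with j = j'+1
def stepAj (ws : List (List Char)) (l : List Char) (i : Nat)
    (dp : List (Option Nat)) (j' : Nat) : List (Option Nat) :=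
  let j := j' + 1
  if (l.drop i).take j ∈ ws then
    dp.set i (optMin (dp.getD i none) ((dp.getD (i + j) none).map (· + 1)))
  else dp

def solution (strs : List String) (t : String) : Int :=
  let l := t.toList
  let ws := strs.map String.toList
  let n := l.length
  -- dp = [INF]*n + [0]; for i in range(n-1,-1,-1): for j in range(1, min(6, n-i+1)): …
  -- (range(1, min(6, n-i+1)) has j'+1 for j' ∈ range (min 5 (n-i)); slices with 0 ≤ i ≤ i+j ≤ n are drop/take)
  let dp := (List.range n).reverse.foldl
    (fun dp i => (List.range (min 5 (n - i))).foldl (stepAj ws l i) dp)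
    (List.replicate n none ++ [some 0])
  match dp.getD 0 none with
  | none => -1
  | some k => (k : Int)

-- ===== PORT B =====
-- `if best[k] is None or c < best[k]: best[k] = c`
def relaxB (best : List (Option Nat)) (k : Nat) (c : Nat) : List (Option Nat) :=
  match best.getD k none with
  | none => best.set k (some c)
  | some v => if c < v then best.set k (some c) else best

-- inner loop of B: `for w in strs: if 1 <= L <= 5 and t[i:i+L] == w: relax`
def stepB (ws : List (List Char)) (l : List Char) (i : Nat) (b : Nat)
    (best : List (Option Nat)) : List (Option Nat) :=
  ws.foldl
    (fun best w =>
      if 1 ≤ w.length ∧ w.length ≤ 5 ∧ (l.drop i).take w.length = w then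
        relaxB best (i + w.length) (b + 1)
      else best)
    best

def solution_alt (strs : List String) (t : String) : Int :=
  let l := t.toList
  let ws := strs.map String.toList
  let n := l.length
  -- best = [None]*(n+1); best[0] = 0; forward over i in range(n)
  let best := (List.range n).foldl
    (fun best i =>
      match best.getD i none with
      | none => best
      | some b => stepB ws l i b best)
    ((List.replicate (n + 1) (none : Option Nat)).set 0 (some 0))
  match best.getD n none with
  | none => -1
  | some k => (k : Int)

-- ===== PRECONDITION & SPEC =====
def Spec_solution (strs : List String) (t : String) (out : Int) : Prop := out = solution_alt strs t
instance (strs : List String) (t : String) (out : Int) : Decidable (Spec_solution strs t out) := by unfold Spec_solution; infer_instance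

-- ===== CLAIM (what is proved, stated in full; the proofs are below) =====
def Claim_equal_solution : Prop := ∀ (strs : List String) (t : String), Dom_solution strs t → Spec_solution strs t (solution strs t)

-- ===== LEMMAS AND PROOFS =====

-- Spec: s splits into k pieces, each a member of ws of length 1..5.
inductive Seg (ws : List (List Char)) : List Char → Nat → Prop
  | nil : Seg ws [] 0
  | cons {w r k} : w ∈ ws → 1 ≤ w.length → w.length ≤ 5 → Seg ws r k → Seg ws (w ++ r) (k + 1)

-- o is the minimum of the set S (none = S empty).
def IsOpt (S : Nat → Prop) (o : Option Nat) : Prop :=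
  (∀ k, o = some k → S k ∧ ∀ v, S v → k ≤ v) ∧ (o = none → ∀ v, ¬ S v)

theorem isOpt_unique {S : Nat → Prop} {o o' : Option Nat}
    (h : IsOpt S o) (h' : IsOpt S o') : o = o' := by
  cases o with
  | none =>
    cases o' with
    | none => rfl
    | some k => exact absurd (h'.1 k rfl).1 (h.2 rfl k)
  | some k =>
    cases o' with
    | none => exact absurd (h.1 k rfl).1 (h'.2 rfl k)
    | some k' =>
      have h1 := h.1 k rfl
      have h2 := h'.1 k' rfl
      exact congrArg some (Nat.le_antisymm (h1.2 k' h2.1) (h2.2 k h1.1))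

theorem isOpt_congr {S T : Nat → Prop} {o : Option Nat}
    (hST : ∀ v, S v ↔ T v) (h : IsOpt S o) : IsOpt T o := by
  constructor
  · intro k hk
    obtain ⟨h1, h2⟩ := h.1 k hk
    exact ⟨(hST k).1 h1, fun v hv => h2 v ((hST v).2 hv)⟩
  · intro hn v hv
    exact h.2 hn v ((hST v).2 hv)

theorem isOpt_empty : IsOpt (fun _ => False) none := by
  constructor
  · intro k hk; cases hk
  · intro _ v hv; exact hv

theorem isOpt_map_succ {S : Nat → Prop} {o : Option Nat} (h : IsOpt S o) :
    IsOpt (fun v => ∃ u, S u ∧ v = u + 1) (o.map (· + 1)) := by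
  cases o with
  | none =>
    constructor
    · intro k hk; cases hk
    · intro _ v hv
      obtain ⟨u, hu, _⟩ := hv
      exact h.2 rfl u hu
  | some k =>
    constructor
    · intro k' hk'
      have h1 := h.1 k rfl
      simp only [Option.map_some, Option.some.injEq] at hk'
      subst hk'
      refine ⟨⟨k, h1.1, rfl⟩, ?_⟩
      rintro v ⟨u, hu, rfl⟩
      exact Nat.succ_le_succ (h1.2 u hu)
    · intro hn; simp at hn

theorem isOpt_optMin {S T : Nat → Prop} {o o' : Option Nat}
    (h : IsOpt S o) (h' : IsOpt T o') : IsOpt (fun v => S v ∨ T v) (optMin o o') := by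
  cases o with
  | none =>
    cases o' with
    | none =>
      simp only [optMin]
      refine ⟨fun k hk => (nomatch hk), fun _ v hv => ?_⟩
      cases hv with
      | inl hv => exact h.2 rfl v hv
      | inr hv => exact h'.2 rfl v hv
    | some k' =>
      simp only [optMin]
      refine ⟨fun k hk => ?_, fun hn => nomatch hn⟩
      obtain rfl : k' = k := by injection hk
      have h1 := h'.1 k' rfl
      refine ⟨Or.inr h1.1, fun v hv => ?_⟩
      cases hv with
      | inl hv => exact absurd hv (h.2 rfl v)
      | inr hv => exact h1.2 v hv
  | some k =>
    cases o' with
    | none =>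
      simp only [optMin]
      refine ⟨fun k0 hk => ?_, fun hn => nomatch hn⟩
      obtain rfl : k = k0 := by injection hk
      have h1 := h.1 k rfl
      refine ⟨Or.inl h1.1, fun v hv => ?_⟩
      cases hv with
      | inl hv => exact h1.2 v hv
      | inr hv => exact absurd hv (h'.2 rfl v)
    | some k' =>
      simp only [optMin]
      refine ⟨fun k0 hk => ?_, fun hn => nomatch hn⟩
      obtain rfl : min k k' = k0 := by injection hk
      have h1 := h.1 k rfl
      have h2 := h'.1 k' rfl
      constructor
      · rcases Nat.le_total k k' with hle | hle
        · rw [min_eq_left hle]; exact Or.inl h1.1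
        · rw [min_eq_right hle]; exact Or.inr h2.1
      · intro v hv
        cases hv with
        | inl hv => exact le_trans (min_le_left _ _) (h1.2 v hv)
        | inr hv => exact le_trans (min_le_right _ _) (h2.2 v hv)

theorem optMin_absorb (a : Option Nat) (c : Nat) :
    optMin (optMin a (some c)) (some c) = optMin a (some c) := by
  cases a <;> simp [optMin]


-- min cost to segment s (reference function; mirrors A's inner recurrence)
def minCost (ws : List (List Char)) : List Char → Option Nat
  | [] => some 0
  | c :: cs =>
    (List.range (min 5 (c :: cs).length)).foldl
      (fun acc j' =>
        if (c :: cs).take (j' + 1) ∈ ws then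
          optMin acc ((minCost ws ((c :: cs).drop (j' + 1))).map (· + 1))
        else acc)
      none
  termination_by s => s.length
  decreasing_by simp

theorem seg_nil' {ws : List (List Char)} {s : List Char} {v : Nat}
    (h : Seg ws s v) (hs : s = []) : v = 0 := by
  cases h with
  | nil => rfl
  | cons hw h1 h5 hr =>
    rename_i w r k
    rw [List.append_eq_nil_iff] at hs
    rw [hs.1] at h1; simp at h1

theorem seg_nil_iff (ws : List (List Char)) (v : Nat) : Seg ws [] v ↔ v = 0 :=
  ⟨fun h => seg_nil' h rfl, fun h => h ▸ Seg.nil⟩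

-- destruct the first piece of a segmentation of a nonempty string
theorem seg_destruct {ws : List (List Char)} {s : List Char} {v : Nat}
    (h : Seg ws s v) (hs : s ≠ []) :
    ∃ w r k, s = w ++ r ∧ w ∈ ws ∧ 1 ≤ w.length ∧ w.length ≤ 5 ∧ Seg ws r k ∧ v = k + 1 := by
  cases h with
  | nil => exact absurd rfl hs
  | cons hw h1 h5 hr =>
    rename_i w r k
    exact ⟨w, r, k, rfl, hw, h1, h5, hr, rfl⟩

-- getD-of-set helpers
theorem getD_set_self {α : Type} [Inhabited α] (l : List α) (i : Nat) (a d : α)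
    (h : i < l.length) : (l.set i a).getD i d = a := by
  rw [List.getD_eq_getElem?_getD, List.getElem?_set_self h]; rfl

theorem getD_set_ne {α : Type} [Inhabited α] (l : List α) (i j : Nat) (a d : α)
    (h : i ≠ j) : (l.set i a).getD j d = l.getD j d := by
  rw [List.getD_eq_getElem?_getD, List.getElem?_set_ne h, ← List.getD_eq_getElem?_getD]

-- the generic shape of both DP recurrences: fold a guarded optMin over candidates
theorem fold_isOpt (cond : Nat → Prop) [DecidablePred cond] (g : Nat → Option Nat)
    (S : Nat → Nat → Prop) (hg : ∀ j, cond j → IsOpt (S j) (g j)) :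
    ∀ (js : List Nat) (acc : Option Nat) (Sa : Nat → Prop), IsOpt Sa acc →
      IsOpt (fun v => Sa v ∨ ∃ j ∈ js, cond j ∧ S j v)
        (js.foldl (fun acc j => if cond j then optMin acc (g j) else acc) acc) := by
  intro js
  induction js with
  | nil =>
    intro acc Sa hSa
    exact isOpt_congr (by simp) hSa
  | cons j js ih =>
    intro acc Sa hSa
    simp only [List.foldl_cons]
    by_cases hc : cond j
    · rw [if_pos hc]
      have := ih (optMin acc (g j)) (fun v => Sa v ∨ S j v)
        (isOpt_optMin hSa (hg j hc))
      refine isOpt_congr (fun v => ?_) this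
      simp only [List.mem_cons]
      constructor
      · rintro (⟨hv | hv⟩ | ⟨j', hj', hcj', hSj'⟩)
        · exact Or.inl hv
        · exact Or.inr ⟨j, Or.inl rfl, hc, hv⟩
        · exact Or.inr ⟨j', Or.inr hj', hcj', hSj'⟩
      · rintro (hv | ⟨j', (rfl | hj'), hcj', hSj'⟩)
        · exact Or.inl (Or.inl hv)
        · exact Or.inl (Or.inr hSj')
        · exact Or.inr ⟨j', hj', hcj', hSj'⟩
    · rw [if_neg hc]
      refine isOpt_congr (fun v => ?_) (ih acc Sa hSa)
      simp only [List.mem_cons]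
      constructor
      · rintro (hv | ⟨j', hj', hcj', hSj'⟩)
        · exact Or.inl hv
        · exact Or.inr ⟨j', Or.inr hj', hcj', hSj'⟩
      · rintro (hv | ⟨j', (rfl | hj'), hcj', hSj'⟩)
        · exact Or.inl hv
        · exact absurd hcj' hc
        · exact Or.inr ⟨j', hj', hcj', hSj'⟩

-- the one-step decomposition of Seg on a nonempty string
theorem seg_cons_iff (ws : List (List Char)) (c : Char) (cs : List Char) (v : Nat) :
    Seg ws (c :: cs) v ↔
      ∃ j' ∈ List.range (min 5 (c :: cs).length), ((c :: cs).take (j' + 1) ∈ ws ∧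
        ∃ u, Seg ws ((c :: cs).drop (j' + 1)) u ∧ v = u + 1) := by
  constructor
  · intro h
    obtain ⟨w, r, k, hsplit, hw, h1, h5, hr, rfl⟩ := seg_destruct h (by simp)
    refine ⟨w.length - 1, ?_, ?_, k, ?_, rfl⟩
    · have hlen : (c :: cs).length = w.length + r.length := by rw [hsplit]; simp
      simp only [List.mem_range]
      omega
    · have h11 : w.length - 1 + 1 = w.length := by omega
      rw [h11, hsplit, List.take_left]
      exact hw
    · have h11 : w.length - 1 + 1 = w.length := by omega
      rw [h11, hsplit, List.drop_left]
      exact hr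
  · rintro ⟨j', hj', hw, u, hu, rfl⟩
    simp only [List.mem_range] at hj'
    have hlen : ((c :: cs).take (j' + 1)).length = j' + 1 := by
      simp only [List.length_take]
      omega
    have hseg := Seg.cons (ws := ws) hw (by omega) (by omega) hu
    rwa [List.take_append_drop] at hseg

theorem minCost_isOpt_aux (ws : List (List Char)) :
    ∀ (N : Nat) (s : List Char), s.length < N → IsOpt (Seg ws s) (minCost ws s) := by
  intro N
  induction N with
  | zero => intro s hs; omega
  | succ N ih =>
    intro s hN
    cases s with
    | nil =>
      rw [minCost]
      refine ⟨fun k hk => ?_, fun hn => by cases hn⟩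
      simp only [Option.some.injEq] at hk
      subst hk
      exact ⟨Seg.nil, fun v hv => by rw [seg_nil_iff] at hv; omega⟩
    | cons c cs =>
      rw [minCost]
      have hfold := fold_isOpt (fun j' => (c :: cs).take (j' + 1) ∈ ws)
        (fun j' => (minCost ws ((c :: cs).drop (j' + 1))).map (· + 1))
        (fun j' v => ∃ u, Seg ws ((c :: cs).drop (j' + 1)) u ∧ v = u + 1)
        (fun j' _ => isOpt_map_succ (ih ((c :: cs).drop (j' + 1)) (by simp at hN ⊢; omega)))
        (List.range (min 5 (c :: cs).length)) none (fun _ => False) isOpt_empty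
      refine isOpt_congr (fun v => ?_) hfold
      rw [seg_cons_iff]
      constructor
      · rintro (hv | ⟨j', hj', hc, hS⟩)
        · exact absurd hv (fun h => h)
        · exact ⟨j', hj', hc, hS⟩
      · rintro ⟨j', hj', hc, hS⟩
        exact Or.inr ⟨j', hj', hc, hS⟩

theorem minCost_isOpt (ws : List (List Char)) (s : List Char) :
    IsOpt (Seg ws s) (minCost ws s) :=
  minCost_isOpt_aux ws (s.length + 1) s (by omega)

-- ---------- A-side: the backward array fold computes minCost on every suffix ----------

theorem A_inner (ws : List (List Char)) (l : List Char) (i : Nat) :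
    ∀ (js : List Nat) (dp : List (Option Nat)), i < dp.length →
      ((js.foldl (stepAj ws l i) dp).length = dp.length ∧
       ∀ k, k ≠ i → (js.foldl (stepAj ws l i) dp).getD k none = dp.getD k none) ∧
      (js.foldl (stepAj ws l i) dp).getD i none =
        js.foldl (fun acc j' =>
          if (l.drop i).take (j' + 1) ∈ ws then
            optMin acc ((dp.getD (i + (j' + 1)) none).map (· + 1))
          else acc) (dp.getD i none) := by
  intro js
  induction js with
  | nil => intro dp hi; exact ⟨⟨rfl, fun _ _ => rfl⟩, rfl⟩
  | cons j js ih =>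
    intro dp hi
    simp only [List.foldl_cons]
    by_cases hc : (l.drop i).take (j + 1) ∈ ws
    · have hstep : stepAj ws l i dp j =
          dp.set i (optMin (dp.getD i none) ((dp.getD (i + (j + 1)) none).map (· + 1))) := by
        simp only [stepAj, if_pos hc]
      rw [hstep]
      set dp1 := dp.set i (optMin (dp.getD i none) ((dp.getD (i + (j + 1)) none).map (· + 1))) with hdp1
      have hlen1 : dp1.length = dp.length := by simp [hdp1]
      have hi1 : i < dp1.length := by omega
      obtain ⟨⟨hlen2, hoff⟩, hcell⟩ := ih dp1 hi1
      have hsame : ∀ k, k ≠ i → dp1.getD k none = dp.getD k none := by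
        intro k hk
        exact getD_set_ne _ _ _ _ _ (fun h => hk h.symm)
      refine ⟨⟨by omega, fun k hk => by rw [hoff k hk, hsame k hk]⟩, ?_⟩
      rw [hcell]
      have hfun : js.foldl (fun acc j' =>
            if (l.drop i).take (j' + 1) ∈ ws then
              optMin acc ((dp1.getD (i + (j' + 1)) none).map (· + 1))
            else acc) (dp1.getD i none) =
          js.foldl (fun acc j' =>
            if (l.drop i).take (j' + 1) ∈ ws then
              optMin acc ((dp.getD (i + (j' + 1)) none).map (· + 1))
            else acc) (dp1.getD i none) := by
        refine PySem.List.foldl_congr_mem _ _ _ _ (fun acc j' _ => ?_)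
        rw [hsame (i + (j' + 1)) (by omega)]
      rw [hfun, if_pos hc]
      have : dp1.getD i none = optMin (dp.getD i none) ((dp.getD (i + (j + 1)) none).map (· + 1)) :=
        getD_set_self _ _ _ _ hi
      rw [this]
    · have hstep : stepAj ws l i dp j = dp := by
        simp only [stepAj, if_neg hc]
      rw [hstep, if_neg hc]
      exact ih dp hi

theorem A_outer (ws : List (List Char)) (l : List Char) :
    ∀ (m : Nat), m ≤ l.length → ∀ (dp : List (Option Nat)), dp.length = l.length + 1 →
      (∀ k, k ≤ l.length → dp.getD k none = if m ≤ k then minCost ws (l.drop k) else none) →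
      (((List.range m).reverse.foldl
          (fun dp i => (List.range (min 5 (l.length - i))).foldl (stepAj ws l i) dp) dp).length
         = l.length + 1 ∧
       ∀ k, k ≤ l.length →
         ((List.range m).reverse.foldl
            (fun dp i => (List.range (min 5 (l.length - i))).foldl (stepAj ws l i) dp) dp).getD k none
           = minCost ws (l.drop k)) := by
  intro m
  induction m with
  | zero =>
    intro _ dp hlen hdp
    refine ⟨hlen, fun k hk => ?_⟩
    simpa using hdp k hk
  | succ m ihm =>
    intro hm dp hlen hdp
    have hrev : (List.range (m + 1)).reverse = m :: (List.range m).reverse := by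
      rw [List.range_succ]; simp
    rw [hrev]
    simp only [List.foldl_cons]
    -- process position i = m
    have hmlt : m < l.length := by omega
    obtain ⟨⟨hlen1, hoff⟩, hcell⟩ :=
      A_inner ws l m (List.range (min 5 (l.length - m))) dp (by omega)
    set dp1 := (List.range (min 5 (l.length - m))).foldl (stepAj ws l m) dp with hdp1
    -- the new cell m equals minCost of the suffix at m
    have hne : l.drop m ≠ [] := by
      rw [Ne, List.drop_eq_nil_iff]; omega
    obtain ⟨c, cs, hcc⟩ := List.exists_cons_of_ne_nil hne
    have hlendrop : (c :: cs).length = l.length - m := by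
      rw [← hcc, List.length_drop]
    have hcellval : dp1.getD m none = minCost ws (l.drop m) := by
      have hbody : ∀ (acc : Option Nat), ∀ j' ∈ List.range (min 5 (l.length - m)),
          (if (l.drop m).take (j' + 1) ∈ ws then
            optMin acc ((dp.getD (m + (j' + 1)) none).map (· + 1))
          else acc)
          = (if (c :: cs).take (j' + 1) ∈ ws then
            optMin acc ((minCost ws ((c :: cs).drop (j' + 1))).map (· + 1))
          else acc) := by
        intro acc j' hj'
        simp only [List.mem_range] at hj'
        have hml : m + (j' + 1) ≤ l.length := by omega
        have h1 : (c :: cs).drop (j' + 1) = l.drop (m + (j' + 1)) := by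
          rw [← hcc, List.drop_drop]
        have hval : dp.getD (m + (j' + 1)) none = minCost ws (l.drop (m + (j' + 1))) := by
          rw [hdp (m + (j' + 1)) hml, if_pos (show m + 1 ≤ m + (j' + 1) by omega)]
        rw [h1, ← hcc, hval]
      rw [hcell, hdp m (by omega), if_neg (show ¬ (m + 1 ≤ m) by omega),
        PySem.List.foldl_congr_mem _ _ _ _ hbody]
      rw [hcc, minCost, hlendrop]
    have hdp1spec : ∀ k, k ≤ l.length →
        dp1.getD k none = if m ≤ k then minCost ws (l.drop k) else none := by
      intro k hk
      by_cases hkm : k = m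
      · subst hkm; rw [hcellval, if_pos (le_refl _)]
      · rw [hoff k hkm, hdp k hk]
        by_cases h1 : m ≤ k
        · have : m + 1 ≤ k := by omega
          rw [if_pos h1, if_pos this]
        · rw [if_neg h1, if_neg (by omega)]
    exact ihm (by omega) dp1 (by omega) hdp1spec

def optToInt : Option Nat → Int
  | none => -1
  | some k => (k : Int)

theorem opt_match (o : Option Nat) :
    (match o with | none => (-1 : Int) | some k => (k : Int)) = optToInt o := by
  cases o <;> rfl

theorem solutionA_eq (strs : List String) (t : String) :
    solution strs t = optToInt (minCost (strs.map String.toList) t.toList) := by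
  have hinit : ∀ k, k ≤ t.toList.length →
      (List.replicate t.toList.length (none : Option Nat) ++ [some 0]).getD k none =
        if t.toList.length ≤ k then minCost (strs.map String.toList) (t.toList.drop k)
        else none := by
    intro k hk
    by_cases hkn : k = t.toList.length
    · subst hkn
      rw [if_pos (le_refl _), List.getD_eq_getElem?_getD,
        List.getElem?_append_right (by rw [List.length_replicate]),
        List.length_replicate, Nat.sub_self, List.drop_length, minCost]
      rfl
    · have hklt : k < t.toList.length := by omega
      rw [if_neg (by omega), List.getD_eq_getElem?_getD,
        List.getElem?_append_left (by rw [List.length_replicate]; exact hklt),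
        List.getElem?_replicate, if_pos hklt]
      rfl
  obtain ⟨hlen, hval⟩ := A_outer (strs.map String.toList) t.toList t.toList.length
    (le_refl _) (List.replicate t.toList.length none ++ [some 0]) (by simp) hinit
  have h0 := hval 0 (by omega)
  rw [List.drop_zero] at h0
  simp only [solution]
  rw [h0]
  exact opt_match _

-- ---------- B-side: the forward push fold computes the same optimum ----------

-- append a last piece to a segmentation
theorem seg_append {ws : List (List Char)} {a w : List Char} {u : Nat}
    (h : Seg ws a u) (hw : w ∈ ws) (h1 : 1 ≤ w.length) (h5 : w.length ≤ 5) :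
    Seg ws (a ++ w) (u + 1) := by
  induction h with
  | nil =>
    simpa using Seg.cons hw h1 h5 Seg.nil
  | cons hw0 h10 h50 hr ih =>
    rename_i w0 r k
    rw [List.append_assoc]
    exact Seg.cons hw0 h10 h50 ih

-- peel the last piece off a segmentation of a nonempty string
theorem seg_last {ws : List (List Char)} {s : List Char} {v : Nat}
    (h : Seg ws s v) (hs : s ≠ []) :
    ∃ a w u, s = a ++ w ∧ w ∈ ws ∧ 1 ≤ w.length ∧ w.length ≤ 5 ∧ Seg ws a u ∧ v = u + 1 := by
  induction h with
  | nil => exact absurd rfl hs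
  | cons hw h1 h5 hr ih =>
    rename_i w r k
    by_cases hrnil : r = []
    · subst hrnil
      exact ⟨[], w, k, by simp, hw, h1, h5, hr, rfl⟩
    · obtain ⟨a, w', u, hra, hw', h1', h5', ha, hku⟩ := ih hrnil
      exact ⟨w ++ a, w', u + 1, by rw [hra, List.append_assoc], hw', h1', h5',
        Seg.cons hw h1 h5 ha, by omega⟩

-- candidate costs of cell k after the first m outer iterations of B
def PCand (ws : List (List Char)) (l : List Char) (m k v : Nat) : Prop :=
  (k = 0 ∧ v = 0) ∨
  ∃ i w u, i < m ∧ w ∈ ws ∧ 1 ≤ w.length ∧ w.length ≤ 5 ∧ i + w.length = k ∧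
    (l.drop i).take w.length = w ∧ Seg ws (l.take i) u ∧ v = u + 1

theorem pcand_zero (ws : List (List Char)) (l : List Char) (k v : Nat) :
    PCand ws l 0 k v ↔ (k = 0 ∧ v = 0) := by
  unfold PCand
  constructor
  · rintro (h | ⟨i, w, u, hi, _⟩)
    · exact h
    · omega
  · exact Or.inl

theorem pcand_succ (ws : List (List Char)) (l : List Char) (m k v : Nat) :
    PCand ws l (m + 1) k v ↔ PCand ws l m k v ∨
      ((∃ w ∈ ws, 1 ≤ w.length ∧ w.length ≤ 5 ∧ m + w.length = k ∧
          (l.drop m).take w.length = w) ∧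
       ∃ u, Seg ws (l.take m) u ∧ v = u + 1) := by
  unfold PCand
  constructor
  · rintro (h | ⟨i, w, u, hi, hw, h1, h5, hk, ht, hs, hv⟩)
    · exact Or.inl (Or.inl h)
    · rcases Nat.lt_succ_iff_lt_or_eq.mp hi with him | rfl
      · exact Or.inl (Or.inr ⟨i, w, u, him, hw, h1, h5, hk, ht, hs, hv⟩)
      · exact Or.inr ⟨⟨w, hw, h1, h5, hk, ht⟩, u, hs, hv⟩
  · rintro ((h | ⟨i, w, u, hi, hw, h1, h5, hk, ht, hs, hv⟩) | ⟨⟨w, hw, h1, h5, hk, ht⟩, u, hs, hv⟩)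
    · exact Or.inl h
    · exact Or.inr ⟨i, w, u, by omega, hw, h1, h5, hk, ht, hs, hv⟩
    · exact Or.inr ⟨m, w, u, by omega, hw, h1, h5, hk, ht, hs, hv⟩

-- once every piece start below k has been processed, the candidates are all segmentations
theorem pcand_full (ws : List (List Char)) (l : List Char) (m k : Nat)
    (hkm : k ≤ m) (hkl : k ≤ l.length) (v : Nat) :
    PCand ws l m k v ↔ Seg ws (l.take k) v := by
  constructor
  · rintro (⟨rfl, rfl⟩ | ⟨i, w, u, hi, hw, h1, h5, hk, ht, hs, hv⟩)
    · simpa using Seg.nil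
    · have htake : l.take k = l.take i ++ w := by
        rw [← hk, List.take_add, ht]
      rw [htake, hv]
      exact seg_append hs hw h1 h5
  · intro hseg
    by_cases hk0 : k = 0
    · subst hk0
      simp only [List.take_zero] at hseg
      rw [seg_nil_iff] at hseg
      exact Or.inl ⟨rfl, hseg⟩
    · have hne : l.take k ≠ [] := by
        have hlk0 : (l.take k).length = k := by rw [List.length_take]; omega
        intro hnil
        rw [hnil] at hlk0
        simp at hlk0
        omega
      obtain ⟨a, w, u, hsplit, hw, h1, h5, ha, hv⟩ := seg_last hseg hne
      have hlk : (l.take k).length = k := by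
        rw [List.length_take]; omega
      have hlens : a.length + w.length = k := by
        rw [← hlk, hsplit]; simp
      refine Or.inr ⟨a.length, w, u, by omega, hw, h1, h5, by omega, ?_, ?_, hv⟩
      · have : (l.take k).drop a.length = w := by rw [hsplit, List.drop_left]
        rw [List.drop_take] at this
        have hwl : k - a.length = w.length := by omega
        rw [hwl] at this
        exact this
      · have : (l.take k).take a.length = a := by rw [hsplit, List.take_left]
        rw [List.take_take, min_eq_left (by omega)] at this
        rw [this]
        exact ha

-- relaxB sets cell k to the min of its old value and c
theorem relaxB_spec (best : List (Option Nat)) (k c : Nat) (hk : k < best.length) :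
    (relaxB best k c).length = best.length ∧
    (relaxB best k c).getD k none = optMin (best.getD k none) (some c) ∧
    ∀ k', k' ≠ k → (relaxB best k c).getD k' none = best.getD k' none := by
  cases hb : best.getD k none with
  | none =>
    have hr : relaxB best k c = best.set k (some c) := by
      unfold relaxB; rw [hb]
    rw [hr]
    exact ⟨by simp, by rw [getD_set_self _ _ _ _ hk]; rfl,
      fun k' hk' => getD_set_ne _ _ _ _ _ (fun h => hk' h.symm)⟩
  | some v =>
    by_cases hc : c < v
    · have hr : relaxB best k c = best.set k (some c) := by
        unfold relaxB; rw [hb]; dsimp only; rw [if_pos hc]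
      rw [hr]
      refine ⟨by simp, ?_, fun k' hk' => getD_set_ne _ _ _ _ _ (fun h => hk' h.symm)⟩
      rw [getD_set_self _ _ _ _ hk]
      simp [optMin, Nat.min_eq_right (le_of_lt hc)]
    · have hr : relaxB best k c = best := by
        unfold relaxB; rw [hb]; dsimp only; rw [if_neg hc]
      refine ⟨by rw [hr], ?_, fun k' _ => by rw [hr]⟩
      rw [hr, hb]
      simp [optMin, Nat.min_eq_left (Nat.le_of_not_lt hc)]

-- the word loop relaxes exactly the cells some word reaches from position m, all with b+1
theorem stepB_fold (l : List Char) (m b : Nat) (hm : m ≤ l.length) :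
    ∀ (wl : List (List Char)) (best : List (Option Nat)), best.length = l.length + 1 →
      ((wl.foldl (fun best w =>
          if 1 ≤ w.length ∧ w.length ≤ 5 ∧ (l.drop m).take w.length = w then
            relaxB best (m + w.length) (b + 1)
          else best) best).length = l.length + 1 ∧
       ∀ k, (wl.foldl (fun best w =>
          if 1 ≤ w.length ∧ w.length ≤ 5 ∧ (l.drop m).take w.length = w then
            relaxB best (m + w.length) (b + 1)
          else best) best).getD k none =
        if ∃ w ∈ wl, (1 ≤ w.length ∧ w.length ≤ 5 ∧ (l.drop m).take w.length = w) ∧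
            m + w.length = k then
          optMin (best.getD k none) (some (b + 1))
        else best.getD k none) := by
  intro wl
  induction wl with
  | nil =>
    intro best hlen
    refine ⟨hlen, fun k => ?_⟩
    rw [if_neg (by simp)]
    rfl
  | cons w rest ih =>
    intro best hlen
    simp only [List.foldl_cons]
    by_cases hc : 1 ≤ w.length ∧ w.length ≤ 5 ∧ (l.drop m).take w.length = w
    · rw [if_pos hc]
      have hwlen : w.length ≤ l.length - m := by
        have := congrArg List.length hc.2.2
        simp only [List.length_take, List.length_drop] at this
        omega
      have hkin : m + w.length < best.length := by omega
      obtain ⟨hrlen, hrcell, hroff⟩ := relaxB_spec best (m + w.length) (b + 1) hkin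
      obtain ⟨hlen2, hcells⟩ := ih (relaxB best (m + w.length) (b + 1)) (by omega)
      refine ⟨hlen2, fun k => ?_⟩
      rw [hcells k]
      by_cases hwk : m + w.length = k
      · subst hwk
        rw [hrcell]
        by_cases hrest : ∃ w' ∈ rest, (1 ≤ w'.length ∧ w'.length ≤ 5 ∧
            (l.drop m).take w'.length = w') ∧ m + w'.length = m + w.length
        · rw [if_pos hrest, if_pos ⟨w, List.mem_cons_self, hc, rfl⟩, optMin_absorb]
        · rw [if_neg hrest, if_pos ⟨w, List.mem_cons_self, hc, rfl⟩]
      · rw [hroff k (fun h => hwk h.symm)]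
        by_cases hrest : ∃ w' ∈ rest, (1 ≤ w'.length ∧ w'.length ≤ 5 ∧
            (l.drop m).take w'.length = w') ∧ m + w'.length = k
        · rw [if_pos hrest, if_pos (by
            obtain ⟨w', hw', hcw', hkw'⟩ := hrest
            exact ⟨w', List.mem_cons_of_mem _ hw', hcw', hkw'⟩)]
        · rw [if_neg hrest, if_neg (by
            rintro ⟨w', hw', hcw', hkw'⟩
            rcases List.mem_cons.mp hw' with rfl | hw'
            · exact hwk hkw'
            · exact hrest ⟨w', hw', hcw', hkw'⟩)]
    · rw [if_neg hc]
      obtain ⟨hlen2, hcells⟩ := ih best hlen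
      refine ⟨hlen2, fun k => ?_⟩
      rw [hcells k]
      by_cases hrest : ∃ w' ∈ rest, (1 ≤ w'.length ∧ w'.length ≤ 5 ∧
          (l.drop m).take w'.length = w') ∧ m + w'.length = k
      · rw [if_pos hrest, if_pos (by
          obtain ⟨w', hw', hcw', hkw'⟩ := hrest
          exact ⟨w', List.mem_cons_of_mem _ hw', hcw', hkw'⟩)]
      · rw [if_neg hrest, if_neg (by
          rintro ⟨w', hw', hcw', hkw'⟩
          rcases List.mem_cons.mp hw' with rfl | hw'
          · exact hc hcw'
          · exact hrest ⟨w', hw', hcw', hkw'⟩)]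

-- adding the step-m candidates updates the optimum to min(old, b+1)
theorem isOpt_add_pieces {ws : List (List Char)} {l : List Char} {m : Nat} {b : Nat}
    {S : Nat → Prop} {o : Option Nat}
    (hS : IsOpt S o) (hb : IsOpt (Seg ws (l.take m)) (some b)) :
    IsOpt (fun v => S v ∨ ∃ u, Seg ws (l.take m) u ∧ v = u + 1)
      (optMin o (some (b + 1))) := by
  have hmap : IsOpt (fun v => ∃ u, Seg ws (l.take m) u ∧ v = u + 1) (some (b + 1)) := by
    have := isOpt_map_succ hb
    simpa using this
  exact isOpt_optMin hS hmap

theorem B_outer (ws : List (List Char)) (l : List Char) :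
    ∀ (c m : Nat), m + c = l.length → ∀ (best : List (Option Nat)),
      best.length = l.length + 1 →
      (∀ k, k ≤ l.length → IsOpt (PCand ws l m k) (best.getD k none)) →
      (((List.range' m c).foldl
          (fun best i => match best.getD i none with
            | none => best
            | some b => stepB ws l i b best) best).length = l.length + 1 ∧
       ∀ k, k ≤ l.length →
         IsOpt (PCand ws l l.length k)
           (((List.range' m c).foldl
              (fun best i => match best.getD i none with
                | none => best
                | some b => stepB ws l i b best) best).getD k none)) := by
  intro c
  induction c with
  | zero =>
    intro m hm best hlen hbest
    simp only [List.range'_zero, List.foldl_nil]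
    have hm' : m = l.length := by omega
    subst hm'
    exact ⟨hlen, hbest⟩
  | succ c ihc =>
    intro m hm best hlen hbest
    rw [List.range'_succ]
    simp only [List.foldl_cons]
    have hmlt : m < l.length := by omega
    cases hgm : best.getD m none with
    | none =>
      -- no segmentation of l.take m exists: nothing is added at step m
      have hempty : ∀ u, ¬ Seg ws (l.take m) u := by
        intro u hu
        have := (hbest m (by omega)).2
        rw [hgm] at this
        exact this rfl u ((pcand_full ws l m m (le_refl m) (by omega) u).mpr hu)
      refine ihc (m + 1) (by omega) best hlen (fun k hk => ?_)
      refine isOpt_congr (fun v => ?_) (hbest k hk)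
      rw [pcand_succ]
      constructor
      · exact Or.inl
      · rintro (h | ⟨_, u, hu, _⟩)
        · exact h
        · exact absurd hu (hempty u)
    | some b =>
      have hoptb : IsOpt (Seg ws (l.take m)) (some b) := by
        have := hbest m (by omega)
        rw [hgm] at this
        exact isOpt_congr (pcand_full ws l m m (le_refl m) (by omega)) this
      obtain ⟨hslen, hscells⟩ := stepB_fold l m b (by omega) ws best hlen
      refine ihc (m + 1) (by omega) (stepB ws l m b best) (by rw [← hslen]; rfl) (fun k hk => ?_)
      have hsk : (stepB ws l m b best).getD k none =
          if ∃ w ∈ ws, (1 ≤ w.length ∧ w.length ≤ 5 ∧ (l.drop m).take w.length = w) ∧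
              m + w.length = k then
            optMin (best.getD k none) (some (b + 1))
          else best.getD k none := hscells k
      by_cases hhit : ∃ w ∈ ws, (1 ≤ w.length ∧ w.length ≤ 5 ∧
          (l.drop m).take w.length = w) ∧ m + w.length = k
      · rw [hsk, if_pos hhit]
        refine isOpt_congr (fun v => ?_) (isOpt_add_pieces (hbest k hk) hoptb)
        rw [pcand_succ]
        constructor
        · rintro (h | ⟨u, hu, hv⟩)
          · exact Or.inl h
          · refine Or.inr ⟨?_, u, hu, hv⟩
            obtain ⟨w, hw, hcw, hkw⟩ := hhit
            exact ⟨w, hw, hcw.1, hcw.2.1, hkw, hcw.2.2⟩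
        · rintro (h | ⟨_, u, hu, hv⟩)
          · exact Or.inl h
          · exact Or.inr ⟨u, hu, hv⟩
      · rw [hsk, if_neg hhit]
        refine isOpt_congr (fun v => ?_) (hbest k hk)
        rw [pcand_succ]
        constructor
        · exact Or.inl
        · rintro (h | ⟨⟨w, hw, h1, h5, hkw, htw⟩, u, hu, hv⟩)
          · exact h
          · exact absurd ⟨w, hw, ⟨h1, h5, htw⟩, hkw⟩ hhit

theorem solutionB_eq (strs : List String) (t : String) :
    ∃ o, IsOpt (Seg (strs.map String.toList) t.toList) o ∧
      solution_alt strs t = optToInt o := by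
  have hinit : ∀ k, k ≤ t.toList.length →
      IsOpt (PCand (strs.map String.toList) t.toList 0 k)
        (((List.replicate (t.toList.length + 1) (none : Option Nat)).set 0 (some 0)).getD k none) := by
    intro k hk
    by_cases hk0 : k = 0
    · subst hk0
      rw [getD_set_self _ _ _ _ (by simp)]
      refine ⟨fun k' hk' => ?_, fun hn => by cases hn⟩
      simp only [Option.some.injEq] at hk'
      subst hk'
      refine ⟨(pcand_zero _ _ 0 0).mpr ⟨rfl, rfl⟩, fun v hv => ?_⟩
      omega
    · rw [getD_set_ne _ _ _ _ _ (fun h => hk0 h.symm),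
        List.getD_eq_getElem?_getD, List.getElem?_replicate, if_pos (by omega)]
      refine ⟨fun k' hk' => (nomatch hk'), fun _ v hv => ?_⟩
      rw [pcand_zero] at hv
      exact hk0 hv.1
  obtain ⟨hlen, hcells⟩ := B_outer (strs.map String.toList) t.toList t.toList.length 0
    (by omega) ((List.replicate (t.toList.length + 1) (none : Option Nat)).set 0 (some 0))
    (by simp) hinit
  have hiff : ∀ v, PCand (strs.map String.toList) t.toList t.toList.length t.toList.length v ↔
      Seg (strs.map String.toList) t.toList v := by
    intro v
    rw [pcand_full (strs.map String.toList) t.toList t.toList.length t.toList.length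
      (le_refl _) (le_refl _) v, List.take_length]
  exact ⟨_, isOpt_congr hiff (hcells t.toList.length (le_refl _)),
    by simp only [solution_alt]; rw [List.range_eq_range']; exact opt_match _⟩

-- ===== VERDICT (by name: the statement is the Claim_ definition above) =====
theorem solution_spec : Claim_equal_solution := by
  unfold Claim_equal_solution
  intro strs t _
  unfold Spec_solution
  obtain ⟨o, ho, hB⟩ := solutionB_eq strs t
  rw [solutionA_eq, hB,
    isOpt_unique (minCost_isOpt (strs.map String.toList) t.toList) ho]
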